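-- pv_equiv track=rewrite | github.com/xjl1111/Semantic-Communication | VLM_CSC/model/VLM-CSC.py | _detect_degenerate_caption
-- ===== SOURCE A (Python) =====
-- def _detect_degenerate_caption(text: str, max_repeat: int = 3) -> bool:
--     """Detect degenerate captions with excessive word repetition.
--
--     BLIP beam-search sometimes collapses into repetitive text like
--     'mouse mouse mouse ...' or 'adopt a cat adopt a cat adopt a cat'.
--     These degenerate captions carry almost no useful semantic information
--     and will pollute both training and evaluation.
--     """
--     words = text.lower().split()
--     if len(words) <= 4:
--         return False
--     from collections import Counter
--     wc = Counter(words)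
--     most_common_word, most_common_count = wc.most_common(1)[0]
--     # Single-word repetition: "mouse mouse mouse mouse..."
--     if most_common_count > max_repeat and most_common_count / len(words) > 0.35:
--         return True
--     # N-gram repetition: "adopt a cat adopt a cat adopt a cat..."
--     # Check if 2-gram or 3-gram patterns repeat excessively
--     for n in (2, 3, 4):
--         if len(words) < n * 2:
--             continue
--         ngrams = [" ".join(words[i:i+n]) for i in range(len(words) - n + 1)]
--         ngram_counts = Counter(ngrams)
--         top_ng, top_count = ngram_counts.most_common(1)[0]
--         if top_count >= 3 and (top_count * n) / len(words) > 0.4: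
--             return True
--     return False
-- ===== SOURCE B (Python) =====
-- def _detect_degenerate_caption(text: str, max_repeat: int = 3) -> bool:
--     """Window-comparison re-implementation: the multiplicity of the most
--     frequent n-word block is found by direct pairwise comparison of word
--     windows (no Counter, no joined n-gram strings), uniformly for n=1,2,3,4."""
--     words = text.lower().split()
--     L = len(words)
--     if L <= 4:
--         return False
--     m1 = _max_window_count(words, 1)
--     if m1 > max_repeat and m1 / L > 0.35:
--         return True
--     for n in (2, 3, 4):
--         if L < n * 2:
--             continue
--         m = _max_window_count(words, n)
--         if m >= 3 and (m * n) / L > 0.4: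
--             return True
--     return False
--
--
-- def _max_window_count(words, n):
--     """Multiplicity of the most frequent length-n window of consecutive words,
--     by pairwise slice comparison."""
--     best = 0
--     for i in range(len(words) - n + 1):
--         c = 0
--         for j in range(len(words) - n + 1):
--             if words[j:j + n] == words[i:i + n]:
--                 c += 1
--         if c > best:
--             best = c
--     return best
-- ===== Notes on version B (the rewrite author's own statement) =====
-- stated objective: alternative
-- what changed: Replaces Counter hashing over joined n-gram strings by direct pairwise comparison of word windows: the most frequent n-word block multiplicity is the best count found by comparing slices words[i:i+n] against every j, uniformly for n=1,2,3,4, never building joined n-gram strings or a frequency table.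
import Mathlib
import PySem

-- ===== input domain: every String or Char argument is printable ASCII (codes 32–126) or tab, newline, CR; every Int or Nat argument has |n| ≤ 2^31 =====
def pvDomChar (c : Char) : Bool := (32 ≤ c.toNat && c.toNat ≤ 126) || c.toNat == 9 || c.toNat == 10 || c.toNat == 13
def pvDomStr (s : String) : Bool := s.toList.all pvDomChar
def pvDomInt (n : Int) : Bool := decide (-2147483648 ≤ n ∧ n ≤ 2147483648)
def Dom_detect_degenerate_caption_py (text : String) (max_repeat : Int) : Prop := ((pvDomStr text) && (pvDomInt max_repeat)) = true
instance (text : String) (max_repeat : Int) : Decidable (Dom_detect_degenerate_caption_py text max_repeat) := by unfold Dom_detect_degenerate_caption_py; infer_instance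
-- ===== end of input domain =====

-- B finds each maximal block multiplicity by pairwise comparison of word windows
-- (slices), never building joined n-gram strings or a Counter; guards unchanged.

-- ===== PORT A =====

-- A builds the n-gram list: [" ".join(words[i:i+n]) for i in range(len(words)-n+1)]
def pvNgrams (words : List String) (n : Int) : List String :=
  (PySem.List.pyRange 0 ((words.length : Int) - n + 1)).map
    (fun i => PySem.Str.join " " (PySem.List.slice words (some i) (some (i + n))))

-- Counter(xs).most_common(1)[0][1]: the count of a maximal-count item (heapq.nlargest
-- is stable, so it is the FIRST maximal item; only the count is used).  The list is
-- nonempty at every call site, so the .getD 0 default is unreachable.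
def pvMostCommonCount (xs : List String) : Int :=
  ((PySem.List.max? (PySem.Dict.counter xs).items (fun p => p.2)).map Prod.snd).getD 0

-- one iteration of A's `for n in (2, 3, 4)` loop (returns true iff this n fires).
-- The float test (top_count*n)/len(words) > 0.4 is ported exactly as 5*top*n > 2*len
-- (the two sides can only disagree when |5*top*n - 2*len| < len/2^50, impossible for ints).
def pvCheckA (words : List String) (n : Int) : Bool :=
  if (words.length : Int) < n * 2 then false
  else
    let top := pvMostCommonCount (pvNgrams words n)
    decide (3 ≤ top ∧ 5 * top * n > 2 * (words.length : Int))

-- literal port of A; `most_common_count/len(words) > 0.35` is ported exactly as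
-- 100*count > 35*len (exact for integer counts/lengths).
def detect_degenerate_caption_py (text : String) (max_repeat : Int) : Bool :=
  let words := PySem.Str.split₀ (PySem.Str.lower text)
  if words.length ≤ 4 then false
  else if max_repeat < pvMostCommonCount words ∧
          35 * (words.length : Int) < 100 * pvMostCommonCount words then true
  else pvCheckA words 2 || pvCheckA words 3 || pvCheckA words 4

-- ===== PORT B =====

-- Source B's words[i:i+n]
def pvWindow (words : List String) (n i : Int) : List String :=
  PySem.List.slice words (some i) (some (i + n))

-- Source B's inner loop: c = number of j with words[j:j+n] == words[i:i+n]
def pvWindowCount (words : List String) (n i : Int) : Int :=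
  (PySem.List.pyRange 0 ((words.length : Int) - n + 1)).foldl
    (fun c j => if pvWindow words n j == pvWindow words n i then c + 1 else c) 0

-- Source B's _max_window_count: best over i of the pairwise count c
def pvMaxWindowCount (words : List String) (n : Int) : Int :=
  (PySem.List.pyRange 0 ((words.length : Int) - n + 1)).foldl
    (fun best i =>
      let c := pvWindowCount words n i
      if best < c then c else best) 0

-- one iteration of Source B's `for n in (2, 3, 4)` loop (same exact integer forms of
-- the float comparisons as in A's port)
def pvCheckB (words : List String) (n : Int) : Bool :=
  if (words.length : Int) < n * 2 then false
  else
    let m := pvMaxWindowCount words n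
    decide (3 ≤ m ∧ 5 * m * n > 2 * (words.length : Int))

def detect_degenerate_caption_py_alt (text : String) (max_repeat : Int) : Bool :=
  let words := PySem.Str.split₀ (PySem.Str.lower text)
  if words.length ≤ 4 then false
  else
    let m1 := pvMaxWindowCount words 1
    if max_repeat < m1 ∧ 35 * (words.length : Int) < 100 * m1 then true
    else pvCheckB words 2 || pvCheckB words 3 || pvCheckB words 4

-- ===== PRECONDITION & SPEC =====
def Spec_detect_degenerate_caption_py (text : String) (max_repeat : Int) (out : Bool) : Prop := out = detect_degenerate_caption_py_alt text max_repeat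
instance (text : String) (max_repeat : Int) (out : Bool) : Decidable (Spec_detect_degenerate_caption_py text max_repeat out) := by unfold Spec_detect_degenerate_caption_py; infer_instance

-- ===== CLAIM (what is proved, stated in full; the proofs are below) =====
def Claim_equal_detect_degenerate_caption_py : Prop := ∀ (text : String) (max_repeat : Int), Dom_detect_degenerate_caption_py text max_repeat → Spec_detect_degenerate_caption_py text max_repeat (detect_degenerate_caption_py text max_repeat)

-- ===== LEMMAS AND PROOFS =====

-- A's count is a maximal multiplicity
theorem mcc_spec (xs : List String) (hne : xs ≠ []) :
    (∃ v ∈ xs, (xs.count v : Int) = pvMostCommonCount xs) ∧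
    (∀ w ∈ xs, (xs.count w : Int) ≤ pvMostCommonCount xs) := by
  unfold pvMostCommonCount
  rw [PySem.Dict.items_counter]
  have hne' : (PySem.Set.ofList xs).map (fun k => (k, (xs.count k : Int))) ≠ [] := by
    obtain ⟨a, t, rfl⟩ := List.exists_cons_of_ne_nil hne
    have ha : a ∈ PySem.Set.ofList (a :: t) :=
      (PySem.Set.mem_ofList _ _).mpr (List.mem_cons_self ..)
    intro h
    rw [List.map_eq_nil_iff.mp h] at ha
    simp at ha
  obtain ⟨p, hp⟩ : ∃ p, PySem.List.max?
      ((PySem.Set.ofList xs).map (fun k => (k, (xs.count k : Int)))) (fun p => p.2) = some p := by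
    cases h : PySem.List.max?
        ((PySem.Set.ofList xs).map (fun k => (k, (xs.count k : Int)))) (fun p => p.2) with
    | none => exact absurd ((PySem.List.max?_eq_none_iff _ _).mp h) hne'
    | some q => exact ⟨q, rfl⟩
  rw [hp]
  obtain ⟨k, hk, hkeq⟩ := List.mem_map.mp (PySem.List.max?_mem hp)
  have hkx : k ∈ xs := (PySem.Set.mem_ofList xs k).mp hk
  refine ⟨⟨k, hkx, ?_⟩, ?_⟩
  · simp [← hkeq]
  · intro w hw
    have hwi : (w, (xs.count w : Int)) ∈ (PySem.Set.ofList xs).map (fun k => (k, (xs.count k : Int))) :=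
      List.mem_map.mpr ⟨w, (PySem.Set.mem_ofList xs w).mpr hw, rfl⟩
    simpa using PySem.List.max?_isMax hp _ hwi

-- split() tokens contain no whitespace characters (invariant of split₀.go)
theorem split₀_go_spacefree (s cur : List Char) (acc : List (List Char))
    (hc : ∀ c ∈ cur, PySem.Chars.isspace c = false)
    (ha : ∀ t ∈ acc, ∀ c ∈ t, PySem.Chars.isspace c = false) :
    ∀ t ∈ PySem.Chars.split₀.go s cur acc, ∀ c ∈ t, PySem.Chars.isspace c = false := by
  induction s generalizing cur acc with
  | nil =>
    rw [PySem.Chars.split₀.go]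
    split
    · intro t ht
      exact ha t (by simpa using ht)
    · intro t ht c hcm
      simp only [List.mem_reverse, List.mem_cons] at ht
      rcases ht with h | h
      · subst h
        exact hc c (by simpa using hcm)
      · exact ha t h c hcm
  | cons d rest ih =>
    rw [PySem.Chars.split₀.go]
    by_cases hd : PySem.Chars.isspace d = true
    · simp only [hd, if_true]
      split
      · exact ih [] acc (by simp) ha
      · refine ih [] _ (by simp) ?_
        intro t ht c hcm
        rcases List.mem_cons.mp ht with h | h
        · subst h
          exact hc c (by simpa using hcm)
        · exact ha t h c hcm
    · simp only [hd]
      refine ih (d :: cur) acc ?_ ha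
      intro c hcm
      rcases List.mem_cons.mp hcm with h | h
      · subst h; simpa using hd
      · exact hc c h

theorem words_spacefree (s : String) :
    ∀ w ∈ PySem.Str.split₀ s, (' ' : Char) ∉ w.toList := by
  intro w hw hmem
  have h : w.toList ∈ PySem.Chars.split₀ s.toList := by
    rw [← PySem.Str.split₀_map_toList]
    exact List.mem_map.mpr ⟨w, hw, rfl⟩
  have := split₀_go_spacefree s.toList [] [] (by simp) (by simp) w.toList h ' ' hmem
  simp [PySem.Chars.isspace] at this

-- join with " " is injective on nonempty lists of space-free words
theorem join_inj (g1 g2 : List String)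
    (h1 : ∀ w ∈ g1, (' ' : Char) ∉ w.toList) (h2 : ∀ w ∈ g2, (' ' : Char) ∉ w.toList)
    (hn1 : g1 ≠ []) (hn2 : g2 ≠ [])
    (h : PySem.Str.join " " g1 = PySem.Str.join " " g2) : g1 = g2 := by
  have ht : ([' '] : List Char).intercalate (g1.map String.toList)
      = ([' '] : List Char).intercalate (g2.map String.toList) := by
    have := congrArg String.toList h
    rw [PySem.Str.toList_join, PySem.Str.toList_join] at this
    simpa [PySem.Chars.join] using this
  have hs1 : ∀ l ∈ g1.map String.toList, (' ' : Char) ∉ l := by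
    intro l hl
    obtain ⟨w, hw, rfl⟩ := List.mem_map.mp hl
    exact h1 w hw
  have hs2 : ∀ l ∈ g2.map String.toList, (' ' : Char) ∉ l := by
    intro l hl
    obtain ⟨w, hw, rfl⟩ := List.mem_map.mp hl
    exact h2 w hw
  have hmn1 : g1.map String.toList ≠ [] := by simpa using hn1
  have hmn2 : g2.map String.toList ≠ [] := by simpa using hn2
  have := (List.splitOn_intercalate _ ' ' hs1 hmn1).symm.trans
    (ht ▸ List.splitOn_intercalate _ ' ' hs2 hmn2)
  exact List.map_injective_iff.mpr (fun a b hab => String.toList_inj.mp hab) this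

-- the central fact: on space-free words, A's most-common count over joined n-grams
-- equals B's best pairwise window count
-- join " " of a single word is the word
theorem join_singleton (w : String) : PySem.Str.join " " [w] = w := by
  apply String.toList_inj.mp
  rw [PySem.Str.toList_join]
  simp [PySem.Chars.join, List.intercalate]

-- words[k:k+n] as take/drop
theorem window_eq (words : List String) (n k : Nat) :
    pvWindow words (n : Int) (k : Int) = (words.drop k).take n := by
  unfold pvWindow
  have h : ((k : Int) + (n : Int)) = ((k + n : Nat) : Int) := by push_cast; ring
  rw [h, PySem.List.slice_natCast]
  congr 1
  omega

-- the seed-or-member shape of a foldl max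
theorem foldl_max_mem (l : List Int) (a : Int) : l.foldl max a = a ∨ l.foldl max a ∈ l := by
  induction l generalizing a with
  | nil => exact Or.inl rfl
  | cons x t ih =>
    rw [List.foldl_cons]
    rcases ih (max a x) with h | h
    · rcases max_choice a x with h2 | h2
      · exact Or.inl (h.trans h2)
      · exact Or.inr (List.mem_cons.mpr (Or.inl (h.trans h2)))
    · exact Or.inr (List.mem_cons.mpr (Or.inr h))

-- the central fact: on space-free words, A's most-common count over joined n-grams
-- equals B's best pairwise window count
theorem mcc_eq_maxwindow (words : List String) (n : Nat)
    (hsp : ∀ w ∈ words, (' ' : Char) ∉ w.toList)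
    (h1 : 1 ≤ n) (hn : n ≤ words.length) :
    pvMostCommonCount (pvNgrams words (n : Int)) = pvMaxWindowCount words (n : Int) := by
  set L := words.length with hL
  set m := L - n + 1 with hm
  have hcast : ((L : Int) - (n : Int) + 1) = (m : Int) := by
    rw [hm]; push_cast; omega
  have hR : PySem.List.pyRange 0 ((L : Int) - (n : Int) + 1)
      = List.map (fun k : Nat => (k : Int)) (List.range m) := by
    rw [hcast]; exact PySem.List.pyRange_zero_natCast m
  set win : Nat → List String := fun k => pvWindow words (n : Int) (k : Int) with hwin
  -- window basic facts
  have hwf : ∀ k < m, win k = (words.drop k).take n := fun k _ => window_eq words n k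
  have hlen : ∀ k < m, (win k).length = n := by
    intro k hk
    rw [hwf k hk]
    simp only [List.length_take, List.length_drop]
    omega
  have hne : ∀ k < m, win k ≠ [] := by
    intro k hk h
    have := hlen k hk
    rw [h] at this
    simp at this
    omega
  have hspw : ∀ k < m, ∀ w ∈ win k, (' ' : Char) ∉ w.toList := by
    intro k hk w hw
    apply hsp
    rw [hwf k hk] at hw
    exact List.mem_of_mem_drop (List.mem_of_mem_take hw)
  -- n-grams are the joined windows
  have hng : pvNgrams words (n : Int) = ((List.range m).map win).map (PySem.Str.join " ") := by
    unfold pvNgrams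
    rw [← hL, hR, List.map_map, List.map_map]
    rfl
  -- count transfer through join
  have hcount : ∀ k < m, (((List.range m).map win).map (PySem.Str.join " ")).count
      (PySem.Str.join " " (win k)) = ((List.range m).map win).count (win k) := by
    intro k hk
    rw [List.count_eq_countP, List.count_eq_countP, List.countP_map, List.countP_map, List.countP_map]
    apply List.countP_congr
    intro j hj
    have hjm : j < m := List.mem_range.mp hj
    simp only [Function.comp]
    constructor
    · intro h
      have := join_inj (win j) (win k) (hspw j hjm) (hspw k hk) (hne j hjm) (hne k hk)
        (by exact eq_of_beq h)
      simpa using this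
    · intro h
      have : win j = win k := by simpa using h
      simp [this]
  -- window count = multiplicity in the window list
  have hwc : ∀ k < m, pvWindowCount words (n : Int) (k : Int)
      = (((List.range m).map win).count (win k) : Int) := by
    intro k hk
    unfold pvWindowCount
    rw [← hL, hR, PySem.List.foldl_count_if ((fun j => pvWindow words (n:Int) j == win k))
      (List.map (fun k : Nat => (k : Int)) (List.range m)) 0]
    rw [List.countP_map, List.count_eq_countP, List.countP_map]
    simp only [zero_add, hwin]
    rfl
  -- the max fold is a max over the counts
  have hstep : (fun (best i : Int) =>
      let c := pvWindowCount words (n : Int) i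
      if best < c then c else best) = fun best i => max best (pvWindowCount words (n : Int) i) := by
    funext b i
    simp only [max_def]
    split_ifs <;> omega
  have hmax : pvMaxWindowCount words (n : Int)
      = ((List.range m).map (fun k : Nat => pvWindowCount words (n : Int) (k : Int))).foldl max 0 := by
    unfold pvMaxWindowCount
    rw [← hL, hR, hstep, List.foldl_map, List.foldl_map]
  -- bounds
  have hm1 : 1 ≤ m := by omega
  obtain ⟨hge, hub⟩ := PySem.List.le_foldl_max
    ((List.range m).map (fun k : Nat => pvWindowCount words (n : Int) (k : Int))) 0
  -- the fold is attained (it cannot be the seed 0 because count at k=0 is ≥ 1)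
  have h0 : 1 ≤ pvWindowCount words (n : Int) ((0 : Nat) : Int) := by
    rw [hwc 0 hm1]
    have : win 0 ∈ (List.range m).map win :=
      List.mem_map.mpr ⟨0, List.mem_range.mpr hm1, rfl⟩
    have := List.count_pos_iff.mpr this
    omega
  rcases foldl_max_mem ((List.range m).map (fun k : Nat => pvWindowCount words (n : Int) (k : Int))) 0 with hz | hmem
  · exfalso
    have h0le := hub _ (List.mem_map.mpr ⟨0, List.mem_range.mpr hm1, rfl⟩)
    rw [hz] at h0le
    simp only [Nat.cast_zero] at h0 h0le
    omega
  · -- attained at some k0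
    obtain ⟨k0, hk0, hk0eq⟩ := List.mem_map.mp hmem
    have hk0m : k0 < m := List.mem_range.mp hk0
    have hSne : ((List.range m).map win).map (PySem.Str.join " ") ≠ [] := by
      simp only [ne_eq, List.map_eq_nil_iff, List.range_eq_nil]
      omega
    obtain ⟨⟨v, hv, hveq⟩, hvub⟩ := mcc_spec _ hSne
    obtain ⟨g, hg, hgeq⟩ := List.mem_map.mp hv
    obtain ⟨kv, hkv, hkveq⟩ := List.mem_map.mp hg
    have hkvm : kv < m := List.mem_range.mp hkv
    rw [hng, hmax, ← hk0eq]
    have hA : pvMostCommonCount (((List.range m).map win).map (PySem.Str.join " "))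
        = (((List.range m).map win).count (win kv) : Int) := by
      rw [← hveq, ← hgeq, ← hkveq]
      exact_mod_cast hcount kv hkvm
    have hle1 : pvMostCommonCount (((List.range m).map win).map (PySem.Str.join " "))
        ≤ pvWindowCount words (n : Int) (k0 : Int) := by
      rw [hA, ← hwc kv hkvm, hk0eq]
      exact hub _ (List.mem_map.mpr ⟨kv, hkv, rfl⟩)
    have hle2' : pvWindowCount words (n : Int) (k0 : Int)
        ≤ pvMostCommonCount (((List.range m).map win).map (PySem.Str.join " ")) := by
      rw [hwc k0 hk0m, ← hcount k0 hk0m]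
      exact hvub _ (List.mem_map.mpr ⟨win k0, List.mem_map.mpr ⟨k0, hk0, rfl⟩, rfl⟩)
    exact le_antisymm hle1 hle2'

-- the 1-gram list is the word list itself
theorem ngrams_one (words : List String) : pvNgrams words 1 = words := by
  unfold pvNgrams
  have hc : ((words.length : Int) - 1 + 1) = (words.length : Int) := by ring
  rw [hc, PySem.List.pyRange_zero_natCast, List.map_map]
  apply List.ext_getElem
  · simp
  · intro i h1 h2
    simp only [List.getElem_map, List.getElem_range, Function.comp]
    have hw : pvWindow words (1 : Int) (i : Int) = [words[i]] := by
      have h := window_eq words 1 i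
      simp only [Nat.cast_one] at h
      rw [h]
      simp [List.take_one, List.head?_drop, h2]
    have : PySem.List.slice words (some (i:Int)) (some ((i:Int) + 1)) = [words[i]] := hw
    rw [this, join_singleton]

theorem check_eq (words : List String) (n : Nat)
    (hsp : ∀ w ∈ words, (' ' : Char) ∉ w.toList) (h1 : 1 ≤ n) :
    pvCheckA words (n : Int) = pvCheckB words (n : Int) := by
  unfold pvCheckA pvCheckB
  split
  · rfl
  · rename_i hg
    have hn : n ≤ words.length := by
      rw [not_lt] at hg
      omega
    rw [mcc_eq_maxwindow words n hsp h1 hn]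

-- ===== VERDICT (by name: the statement is the Claim_ definition above) =====
theorem detect_degenerate_caption_py_spec : Claim_equal_detect_degenerate_caption_py := by
  intro text max_repeat _
  unfold Spec_detect_degenerate_caption_py
  unfold detect_degenerate_caption_py detect_degenerate_caption_py_alt
  set words := PySem.Str.split₀ (PySem.Str.lower text) with hw
  have hsp : ∀ w ∈ words, (' ' : Char) ∉ w.toList := words_spacefree _
  by_cases h4 : words.length ≤ 4
  · simp [h4]
  · have hn1 : (1 : Nat) ≤ words.length := by omega
    have hkey : pvMostCommonCount words = pvMaxWindowCount words 1 := by
      have := mcc_eq_maxwindow words 1 hsp le_rfl hn1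
      simp only [Nat.cast_one] at this
      rwa [ngrams_one] at this
    have h2 := check_eq words 2 hsp (by norm_num)
    have h3 := check_eq words 3 hsp (by norm_num)
    have h4' := check_eq words 4 hsp (by norm_num)
    simp only [Nat.cast_ofNat] at h2 h3 h4'
    simp [h4, h2, h3, h4', hkey]
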